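-- pv_equiv track=rewrite | github.com/Dowonida/maj | mjhr.py | bodycheck
-- ===== SOURCE A (Python) =====
-- def bodycheck(a):#BC는 [머리,나머지]
--     H=[]
--     b=a[0].copy()
--     b.sort()
--     for i in range(len(b)-1):
--         if b[i]==b[i+1]:
--             if b[i] not in H:
--                 H.append(b[i])
--     BC=[]
--     for i in H:
--         b=a[0].copy()
--         b.sort()
--         b.remove(i)
--         b.remove(i)
--         c=[]
--         c.append([i,i])
--         c.append(b)
--         for j in a:
--             c.append(j)
--         c.remove(a[0])
--         if [] in c:
--             c.remove([])
--         BC.append(c)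
--     return BC
-- ===== SOURCE B (Python) =====
-- def bodycheck(a):
--     # single grouped pass over the sorted hand: walk equal-value runs once,
--     # emitting a split at each run of length >= 2; remainder built positionally
--     tail = list(a[1:])
--     res = []
--     prefix, rest = [], sorted(a[0])
--     while rest:
--         x, t = rest[0], rest[1:]
--         run = 0
--         while run < len(t) and t[run] == x:
--             run += 1
--         if run >= 1:  # x occurs at least twice in the hand
--             c = [[x, x], prefix + t[1:]] + tail
--             if [] in c:
--                 c.remove([])
--             res.append(c)
--         prefix, rest = prefix + [x] + t[:run], t[run:]
--     return res
-- ===== Notes on version B (the rewrite author's own statement) =====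
-- stated objective: alternative
-- what changed: B sorts the hand once and walks it in a single run-length-grouped pass: each maximal run of equal values of length >= 2 directly yields a split whose remainder is built positionally (prefix + suffix around the run), replacing A's two staged passes (an adjacency scan collecting candidates, then per candidate a fresh sort, two remove() calls and an append-everything-then-remove(a[0]) rebuild).
import Mathlib
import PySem

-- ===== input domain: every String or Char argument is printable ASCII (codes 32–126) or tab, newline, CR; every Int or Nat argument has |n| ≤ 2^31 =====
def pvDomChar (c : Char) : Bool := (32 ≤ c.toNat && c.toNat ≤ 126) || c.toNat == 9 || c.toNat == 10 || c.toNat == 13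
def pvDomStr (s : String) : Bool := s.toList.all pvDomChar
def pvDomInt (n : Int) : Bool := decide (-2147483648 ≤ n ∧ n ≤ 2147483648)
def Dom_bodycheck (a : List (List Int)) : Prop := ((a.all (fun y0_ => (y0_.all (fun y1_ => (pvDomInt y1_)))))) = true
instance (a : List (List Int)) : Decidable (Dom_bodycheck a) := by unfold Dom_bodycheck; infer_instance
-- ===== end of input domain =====

-- B sorts the hand once and walks it in one run-length-grouped pass, emitting a split at each
-- run of length >= 2 with the remainder built positionally around the run (objective: alternative).

-- ===== PORT A =====
def bodycheck (a : List (List Int)) : List (List (List Int)) :=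
  match a with
  | [] => []            -- Python raises IndexError on a[0]; excluded by Pre_bodycheck
  | a0 :: _ =>
    let b := PySem.List.sorted a0 (fun x => x) false
    let H := (PySem.List.pyRange 0 (PySem.List.len b - 1) 1).foldl
      (fun H i =>
        if PySem.List.pyGetD b i 0 = PySem.List.pyGetD b (i + 1) 0 then
          if PySem.List.pyGetD b i 0 ∈ H then H else H ++ [PySem.List.pyGetD b i 0]
        else H) []
    H.foldl
      (fun BC i =>
        let b1 := PySem.List.sorted a0 (fun x => x) false
        -- b.remove(i) twice: i always occurs twice in b here, so the getD fallback is never taken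
        let b2 := (PySem.List.remove? b1 i).getD b1
        let b3 := (PySem.List.remove? b2 i).getD b2
        let c0 := a.foldl (fun c j => c ++ [j]) [[i, i], b3]
        -- c.remove(a[0]): a[0] ∈ c always, the fallback is never taken
        let c1 := (PySem.List.remove? c0 a0).getD c0
        let c2 := if [] ∈ c1 then (PySem.List.remove? c1 ([] : List Int)).getD c1 else c1
        BC ++ [c2]) []

-- ===== PORT B =====
-- B's outer while loop over (prefix, rest); the inner while computing `run` is the length of the
-- maximal block of x at the front of t, i.e. t.takeWhile (== x) — exact; t[:run]/t[run:] are that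
-- takeWhile/dropWhile, t[1:] is t.drop 1.
def bcGo (tail : List (List Int)) (pre : List Int) (rest : List Int) : List (List (List Int)) :=
  match rest with
  | [] => []
  | x :: t =>
    let runBlock := t.takeWhile (fun v => v == x)
    let out :=
      if 1 ≤ runBlock.length then
        let c0 := [[x, x], pre ++ t.drop 1] ++ tail
        [if ([] : List Int) ∈ c0 then (PySem.List.remove? c0 ([] : List Int)).getD c0 else c0]
      else []
    out ++ bcGo tail (pre ++ [x] ++ runBlock) (t.dropWhile (fun v => v == x))
termination_by rest.length
decreasing_by
  simp only [List.length_cons]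
  have := List.length_dropWhile_le (fun v => v == x) t
  omega

def bodycheck_alt (a : List (List Int)) : List (List (List Int)) :=
  match a with
  | [] => []            -- Python raises IndexError on a[0]; excluded by Pre_bodycheck
  | a0 :: rest =>
    bcGo rest [] (PySem.List.sorted a0 (fun x => x) false)

-- ===== PRECONDITION & SPEC =====
-- Python A evaluates a[0] first, so it raises IndexError exactly on the empty list.
def Pre_bodycheck (a : List (List Int)) : Prop := a ≠ []
instance (a : List (List Int)) : Decidable (Pre_bodycheck a) := by unfold Pre_bodycheck; infer_instance
def pvWitness_bodycheck : List (List Int) := [[1, 1, 2], [3]]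

def Spec_bodycheck (a : List (List Int)) (out : List (List (List Int))) : Prop := out = bodycheck_alt a
instance (a : List (List Int)) (out : List (List (List Int))) : Decidable (Spec_bodycheck a out) := by unfold Spec_bodycheck; infer_instance

-- ===== CLAIM (what is proved, stated in full; the proofs are below) =====
def Claim_equal_bodycheck : Prop := ∀ (a : List (List Int)), Dom_bodycheck a → Pre_bodycheck a → Spec_bodycheck a (bodycheck a)

-- ===== LEMMAS AND PROOFS =====

-- A's adjacency scan for head candidates, as structural recursion (proof helper only).
def bcScan : List Int → List Int → List Int
  | H, x :: y :: t => bcScan (if x = y then (if x ∈ H then H else H ++ [x]) else H) (y :: t)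
  | H, _ => H

-- the per-candidate split, in erased normal form (proof helper only).
def mkC (tail : List (List Int)) (s : List Int) (i : Int) : List (List Int) :=
  let s2 := (s.erase i).erase i
  let c0 := [[i, i], s2] ++ tail
  if ([] : List Int) ∈ c0 then (PySem.List.remove? c0 ([] : List Int)).getD c0 else c0

-- B's candidate values, by the same run recursion as bcGo (proof helper only).
def pairsOf (rest : List Int) : List Int :=
  match rest with
  | [] => []
  | x :: t =>
    (if 1 ≤ (t.takeWhile (fun v => v == x)).length then [x] else [])
      ++ pairsOf (t.dropWhile (fun v => v == x))
termination_by rest.length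
decreasing_by
  simp only [List.length_cons]
  have := List.length_dropWhile_le (fun v => v == x) t
  omega

lemma natfold_eq_bcScan : ∀ (b H : List Int),
    (List.range (b.length - 1)).foldl
      (fun H k => if b.getD k 0 = b.getD (k + 1) 0 then
          (if b.getD k 0 ∈ H then H else H ++ [b.getD k 0]) else H) H
    = bcScan H b := by
  intro b
  induction b with
  | nil => intro H; simp [bcScan]
  | cons x t ih =>
    intro H
    cases t with
    | nil => simp [bcScan]
    | cons y t' =>
      have h1 : (x :: y :: t').length - 1 = t'.length + 1 := by simp
      rw [h1, List.range_succ_eq_map, List.foldl_cons, List.foldl_map]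
      simp only [List.getD_cons_zero, List.getD_cons_succ, Nat.succ_eq_add_one,
        Nat.zero_add]
      rw [show bcScan H (x :: y :: t') =
        bcScan (if x = y then (if x ∈ H then H else H ++ [x]) else H) (y :: t') from rfl]
      have h2 : t'.length = (y :: t').length - 1 := by simp
      rw [h2]
      exact ih _

lemma pyfold_eq_bcScan (b : List Int) :
    (PySem.List.pyRange 0 (PySem.List.len b - 1) 1).foldl
      (fun H i => if PySem.List.pyGetD b i 0 = PySem.List.pyGetD b (i + 1) 0 then
          (if PySem.List.pyGetD b i 0 ∈ H then H else H ++ [PySem.List.pyGetD b i 0]) else H) []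
    = bcScan [] b := by
  rw [PySem.List.len_eq]
  match b with
  | [] =>
    rw [PySem.List.pyRange_one_eq_nil (by simp)]
    simp [bcScan]
  | x :: t =>
    have h1 : (↑(x :: t).length - 1 : Int) = (((x :: t).length - 1 : Nat) : Int) := by
      simp
    rw [h1, PySem.List.pyRange_zero_nat, List.foldl_map]
    rw [← natfold_eq_bcScan (x :: t) []]
    congr 1
    funext H k
    rw [show ((k : Int) + 1) = ((k + 1 : Nat) : Int) by push_cast; ring]
    simp only [PySem.List.pyGetD_natCast]

lemma bcScan_spec : ∀ (b H : List Int), b.Pairwise (· ≤ ·) → H.Pairwise (· < ·) →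
    (∀ h ∈ H, ∀ x ∈ b, h ≤ x) →
    (bcScan H b).Pairwise (· < ·) ∧ ∀ v, (v ∈ bcScan H b ↔ v ∈ H ∨ 2 ≤ List.count v b) := by
  intro b
  induction b with
  | nil =>
    intro H _ hH _
    refine ⟨by simpa [bcScan] using hH, fun v => ?_⟩
    simp [bcScan]
  | cons x t ih =>
    intro H hb hH hbound
    cases t with
    | nil =>
      refine ⟨by simpa [bcScan] using hH, fun v => ?_⟩
      simp only [bcScan]
      constructor
      · intro h; exact Or.inl h
      · rintro (h | h)
        · exact h
        · exfalso
          have : List.count v [x] ≤ 1 := by simp [List.count_singleton]; split <;> omega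
          omega
    | cons y t' =>
      rw [show bcScan H (x :: y :: t') =
        bcScan (if x = y then (if x ∈ H then H else H ++ [x]) else H) (y :: t') from rfl]
      have hxy : x ≤ y := (List.pairwise_cons.1 hb).1 y (by simp)
      have hxall : ∀ z ∈ y :: t', x ≤ z := (List.pairwise_cons.1 hb).1
      have hb' : (y :: t').Pairwise (· ≤ ·) := (List.pairwise_cons.1 hb).2
      set H' := if x = y then (if x ∈ H then H else H ++ [x]) else H with hH'
      have hH'pw : H'.Pairwise (· < ·) := by
        rw [hH']
        split
        · split
          · exact hH
          · rename_i hxH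
            rw [List.pairwise_append]
            refine ⟨hH, by simp, ?_⟩
            intro p hp q hq
            simp at hq
            rw [hq]
            exact lt_of_le_of_ne (hbound p hp x (by simp)) (fun h => hxH (h ▸ hp))
        · exact hH
      have hH'bound : ∀ h ∈ H', ∀ z ∈ y :: t', h ≤ z := by
        intro h hh z hz
        rw [hH'] at hh
        have hz' : z ∈ x :: y :: t' := List.mem_cons_of_mem _ hz
        split at hh
        · split at hh
          · exact hbound h hh z hz'
          · rcases List.mem_append.1 hh with h1 | h1
            · exact hbound h h1 z hz'
            · simp at h1; subst h1; exact hxall z hz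
        · exact hbound h hh z hz'
      have hH'mem : ∀ v, v ∈ H' ↔ (v ∈ H ∨ (x = y ∧ v = x)) := by
        intro v
        rw [hH']
        split
        · rename_i hxy'
          split
          · rename_i hxH
            constructor
            · intro h; exact Or.inl h
            · rintro (h | ⟨_, h⟩)
              · exact h
              · subst h; exact hxH
          · simp only [List.mem_append, List.mem_singleton]
            tauto
        · rename_i hxy'
          constructor
          · intro h; exact Or.inl h
          · rintro (h | ⟨h1, _⟩)
            · exact h
            · exact absurd h1 hxy'
      obtain ⟨hpw, hmem⟩ := ih H' hb' hH'pw hH'bound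
      refine ⟨hpw, fun v => ?_⟩
      rw [hmem v, hH'mem v]
      by_cases hvx : v = x
      · rw [hvx]
        by_cases hxy' : x = y
        · constructor
          · intro _; right
            have hpos : 0 < List.count x (y :: t') := by
              rw [List.count_pos_iff, ← hxy']; simp
            rw [List.count_cons]
            simp only [BEq.rfl, if_true]
            omega
          · intro _; left; right; exact ⟨hxy', rfl⟩
        · have hx_nin : x ∉ y :: t' := by
            intro hmem'
            have := hxall x hmem'
            rcases List.mem_cons.1 hmem' with h | h
            · exact hxy' h
            · have hyx : y ≤ x := (List.pairwise_cons.1 hb').1 x h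
              exact hxy' (le_antisymm hxy hyx)
          have hc0 : List.count x (y :: t') = 0 := by
            simpa [List.count_eq_zero] using hx_nin
          constructor
          · rintro ((h | ⟨h1, _⟩) | h)
            · left; exact h
            · exact absurd h1 hxy'
            · rw [hc0] at h; omega
          · rintro (h | h)
            · left; left; exact h
            · exfalso
              rw [List.count_cons, hc0] at h
              simp at h
      · have hcv : List.count v (x :: y :: t') = List.count v (y :: t') := by
          simp [List.count_cons, Ne.symm hvx]
        rw [hcv]
        constructor
        · rintro ((h | ⟨_, h⟩) | h)
          · left; exact h
          · exact absurd h hvx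
          · right; exact h
        · rintro (h | h)
          · left; left; exact h
          · right; exact h

-- every element surviving the dropWhile of an equal-run is strictly greater than the run value.
lemma dropWhile_gt (x : Int) (t : List Int) (h : (x :: t).Pairwise (· ≤ ·)) :
    ∀ r ∈ t.dropWhile (fun v => v == x), x < r := by
  intro r hr
  have ht : t.Pairwise (· ≤ ·) := (List.pairwise_cons.1 h).2
  have hxall : ∀ z ∈ t, x ≤ z := (List.pairwise_cons.1 h).1
  have hsub : (t.dropWhile (fun v => v == x)).Sublist t :=
    List.dropWhile_sublist (fun v => v == x)
  have hdw : (t.dropWhile (fun v => v == x)).Pairwise (· ≤ ·) := ht.sublist hsub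
  cases hdwc : t.dropWhile (fun v => v == x) with
  | nil => rw [hdwc] at hr; simp at hr
  | cons hd d =>
    have hne : hd ≠ x := by
      have hW : List.dropWhile (fun v => v == x) t ≠ [] := by rw [hdwc]; simp
      have := List.head_dropWhile_not (fun v => v == x) (l := t) hW
      simp only [hdwc, List.head_cons] at this
      simpa using this
    have hhd_mem : hd ∈ t := hsub.mem (by rw [hdwc]; simp)
    have hxhd : x < hd := lt_of_le_of_ne (hxall hd hhd_mem) (Ne.symm hne)
    rw [hdwc] at hr hdw
    rcases List.mem_cons.1 hr with h1 | h1
    · exact h1 ▸ hxhd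
    · exact lt_of_lt_of_le hxhd ((List.pairwise_cons.1 hdw).1 r h1)

-- for sorted input, pairsOf is the strictly increasing list of values occurring at least twice.
lemma pairsOf_spec : ∀ (rest : List Int), rest.Pairwise (· ≤ ·) →
    (pairsOf rest).Pairwise (· < ·) ∧ ∀ w, (w ∈ pairsOf rest ↔ 2 ≤ List.count w rest) := by
  intro rest
  induction rest using pairsOf.induct with
  | case1 =>
    intro _
    refine ⟨by simp only [pairsOf]; exact List.Pairwise.nil, fun w => ?_⟩
    simp [pairsOf]
  | case2 x t ih =>
    intro hpw
    have ht : t.Pairwise (· ≤ ·) := (List.pairwise_cons.1 hpw).2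
    have hdwpw : (t.dropWhile (fun v => v == x)).Pairwise (· ≤ ·) :=
      ht.sublist (List.dropWhile_sublist (fun v => v == x))
    obtain ⟨ihpw, ihmem⟩ := ih hdwpw
    have hgt : ∀ r ∈ t.dropWhile (fun v => v == x), x < r := dropWhile_gt x t hpw
    have hx_nin : x ∉ t.dropWhile (fun v => v == x) := fun h => lt_irrefl x (hgt x h)
    have hsplit : t.takeWhile (fun v => v == x) ++ t.dropWhile (fun v => v == x) = t :=
      List.takeWhile_append_dropWhile
    have htw_all : ∀ v ∈ t.takeWhile (fun v => v == x), v = x :=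
      fun v hv => by simpa using List.mem_takeWhile_imp hv
    have h1 : List.count x (t.takeWhile (fun v => v == x))
        = (t.takeWhile (fun v => v == x)).length :=
      List.count_eq_length.mpr (fun b hb => (htw_all b hb).symm)
    have h2 : List.count x (t.dropWhile (fun v => v == x)) = 0 := List.count_eq_zero.2 hx_nin
    have hcx : List.count x (x :: t) = 1 + (t.takeWhile (fun v => v == x)).length := by
      have h4 : List.count x t = (t.takeWhile (fun v => v == x)).length := by
        conv_lhs => rw [← hsplit]
        rw [List.count_append, h1, h2]
        omega
      rw [List.count_cons_self, h4]
      omega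
    have hcv : ∀ w, w ≠ x → List.count w (x :: t)
        = List.count w (t.dropWhile (fun v => v == x)) := by
      intro w hw
      rw [List.count_cons_of_ne (Ne.symm hw)]
      conv_lhs => rw [← hsplit]
      rw [List.count_append]
      have h3 : List.count w (t.takeWhile (fun v => v == x)) = 0 :=
        List.count_eq_zero.2 (fun h => hw (htw_all w h))
      omega
    constructor
    · rw [pairsOf]
      by_cases hlen : 1 ≤ (t.takeWhile (fun v => v == x)).length
      · rw [if_pos hlen, List.singleton_append]
        refine List.pairwise_cons.2 ⟨?_, ihpw⟩
        intro w hw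
        have hc := (ihmem w).1 hw
        have : w ∈ t.dropWhile (fun v => v == x) := List.count_pos_iff.1 (by omega)
        exact hgt w this
      · rw [if_neg hlen, List.nil_append]
        exact ihpw
    · intro w
      rw [pairsOf]
      by_cases hwx : w = x
      · subst hwx
        rw [hcx]
        constructor
        · intro hv
          rcases List.mem_append.1 hv with hm | hm
          · split at hm
            · rename_i hl; omega
            · simp at hm
          · have := (ihmem w).1 hm
            omega
        · intro hn
          have hlen : 1 ≤ (t.takeWhile (fun v => v == w)).length := by omega
          exact List.mem_append.2 (Or.inl (by rw [if_pos hlen]; simp))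
      · rw [hcv w hwx]
        constructor
        · intro hv
          rcases List.mem_append.1 hv with hm | hm
          · exfalso; split at hm <;> simp at hm; exact hwx hm
          · exact (ihmem w).1 hm
        · intro hn
          exact List.mem_append.2 (Or.inr ((ihmem w).2 hn))

-- two strictly increasing integer lists with the same members are equal.
lemma sorted_lt_eq (l1 l2 : List Int) (h1 : l1.Pairwise (· < ·)) (h2 : l2.Pairwise (· < ·))
    (hm : ∀ v, v ∈ l1 ↔ v ∈ l2) : l1 = l2 := by
  have hperm : l1.Perm l2 := by
    rw [List.perm_ext_iff_of_nodup (h1.imp ne_of_lt) (h2.imp ne_of_lt)]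
    exact hm
  exact List.Perm.eq_of_pairwise
    (fun a b _ _ hab hba => absurd hba (not_lt.2 hab.le)) h1 h2 hperm

-- bcGo computes, per candidate of pairsOf, the erased-normal-form split.
lemma bcGo_eq (tail : List (List Int)) : ∀ (rest pre : List Int),
    rest.Pairwise (· ≤ ·) → (∀ p ∈ pre, ∀ r ∈ rest, p < r) →
    bcGo tail pre rest = (pairsOf rest).map (mkC tail (pre ++ rest)) := by
  intro rest
  induction rest using pairsOf.induct with
  | case1 =>
    intro pre _ _
    rw [bcGo, pairsOf]
    simp
  | case2 x t ih =>
    intro pre hpw hlt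
    have ht : t.Pairwise (· ≤ ·) := (List.pairwise_cons.1 hpw).2
    have hdw : (t.dropWhile (fun v => v == x)).Pairwise (· ≤ ·) :=
      ht.sublist (List.dropWhile_sublist (fun v => v == x))
    have hgt : ∀ r ∈ t.dropWhile (fun v => v == x), x < r := dropWhile_gt x t hpw
    have htw : ∀ v ∈ t.takeWhile (fun v => v == x), v = x :=
      fun v hv => by simpa using List.mem_takeWhile_imp hv
    have hlt' : ∀ p ∈ pre ++ [x] ++ t.takeWhile (fun v => v == x),
        ∀ r ∈ t.dropWhile (fun v => v == x), p < r := by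
      intro p hp r hr
      rcases List.mem_append.1 hp with hp1 | hp1
      · rcases List.mem_append.1 hp1 with hp2 | hp2
        · exact hlt p hp2 r
            (List.mem_cons_of_mem _ ((List.dropWhile_sublist (fun v => v == x)).mem hr))
        · simp at hp2; exact hp2 ▸ hgt r hr
      · exact (htw p hp1) ▸ hgt r hr
    have hrec := ih (pre ++ [x] ++ t.takeWhile (fun v => v == x)) hdw hlt'
    have hpres : pre ++ [x] ++ t.takeWhile (fun v => v == x)
        ++ t.dropWhile (fun v => v == x) = pre ++ x :: t := by
      rw [List.append_assoc (pre ++ [x]), List.takeWhile_append_dropWhile]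
      simp
    rw [bcGo, pairsOf, hrec, hpres, List.map_append]
    congr 1
    by_cases hlen : 1 ≤ (t.takeWhile (fun v => v == x)).length
    · rw [if_pos hlen, if_pos hlen]
      -- run >= 1 : t starts with x, and the positional remainder equals the double erase
      have htne : t ≠ [] := by
        intro h; rw [h] at hlen; simp at hlen
      obtain ⟨h0, t', rfl⟩ := List.exists_cons_of_ne_nil htne
      have hh0 : h0 = x := by
        by_contra hne
        rw [List.takeWhile_cons, if_neg (by simpa using hne)] at hlen
        simp at hlen
      have hxpre : x ∉ pre := fun h => lt_irrefl x (hlt x h x (by simp))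
      have herase : ((pre ++ x :: h0 :: t').erase x).erase x = pre ++ t' := by
        rw [List.erase_append_right _ hxpre, List.erase_cons_head,
            List.erase_append_right _ hxpre, hh0, List.erase_cons_head]
      simp only [mkC, List.map_cons, List.map_nil, herase]
      simp
    · rw [if_neg hlen, if_neg hlen]
      simp

-- A's per-candidate body equals the erased-normal-form split.
lemma body_eq (a0 : List Int) (rest : List (List Int)) (i : Int)
    (h2 : 2 ≤ List.count i a0) :
    (let b1 := PySem.List.sorted a0 (fun x => x) false
     let b2 := (PySem.List.remove? b1 i).getD b1
     let b3 := (PySem.List.remove? b2 i).getD b2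
     let c0 := (a0 :: rest).foldl (fun c j => c ++ [j]) [[i, i], b3]
     let c1 := (PySem.List.remove? c0 a0).getD c0
     if [] ∈ c1 then (PySem.List.remove? c1 ([] : List Int)).getD c1 else c1)
    = mkC rest (PySem.List.sorted a0 (fun x => x) false) i := by
  set b := PySem.List.sorted a0 (fun x => x) false with hbdef
  have hcnt : List.count i b = List.count i a0 :=
    (PySem.List.sorted_perm a0 (fun x => x) false).count_eq i
  have hib : i ∈ b := List.count_pos_iff.1 (by omega)
  have hr1 : PySem.List.remove? b i = some (b.erase i) :=
    PySem.List.remove?_eq_some_erase b i hib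
  have hib2 : i ∈ b.erase i := by
    rw [← List.count_pos_iff, List.count_erase_self]
    omega
  have hr2 : PySem.List.remove? (b.erase i) i = some ((b.erase i).erase i) :=
    PySem.List.remove?_eq_some_erase _ i hib2
  simp only [mkC, hr1, Option.getD_some, hr2]
  set b3 := (b.erase i).erase i with hb3def
  rw [PySem.List.foldl_append_singleton]
  have hlen3 : b3.length + 2 = a0.length := by
    have e1 : (b.erase i).length = b.length - 1 := List.length_erase_of_mem hib
    have e2 : b3.length = (b.erase i).length - 1 := List.length_erase_of_mem hib2
    have e3 : b.length = a0.length := PySem.List.length_sorted a0 (fun x => x) false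
    have hc : 2 ≤ List.count i b := by omega
    have : 2 ≤ b.length := le_trans hc List.count_le_length
    omega
  by_cases hcase : a0 = [i, i]
  · subst hcase
    have hb : b = [i, i] := by
      rw [hbdef]
      exact PySem.List.sorted_eq_self_of_pairwise _ _ (by simp)
    have hb3 : b3 = [] := by rw [hb3def, hb]; simp
    rw [hb3]
    simp only [List.cons_append, List.nil_append]
    rw [PySem.List.remove?_cons_self]
    simp only [Option.getD_some]
    have h1 : ([] : List Int) ∈ ([] :: [i, i] :: rest : List (List Int)) := by simp
    have h2' : ([] : List Int) ∈ ([i, i] :: [] :: rest : List (List Int)) := by simp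
    rw [if_pos h1, if_pos h2']
    rw [PySem.List.remove?_cons_self]
    rw [PySem.List.remove?_cons_of_ne _ (by simp), PySem.List.remove?_cons_self]
    simp
  · have hne1 : ([i, i] : List Int) ≠ a0 := fun h => hcase h.symm
    have hne2 : b3 ≠ a0 := by
      intro h
      have := congrArg List.length h
      omega
    simp only [List.cons_append, List.nil_append]
    rw [PySem.List.remove?_cons_of_ne _ hne1,
        PySem.List.remove?_cons_of_ne _ hne2,
        PySem.List.remove?_cons_self]
    simp

-- ===== VERDICT (by name: the statement is the Claim_ definition above) =====
theorem bodycheck_spec : Claim_equal_bodycheck := by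
  intro a _ hpre
  unfold Spec_bodycheck
  match a with
  | [] => exact absurd rfl hpre
  | a0 :: rest =>
    show bodycheck (a0 :: rest) = bodycheck_alt (a0 :: rest)
    simp only [bodycheck, bodycheck_alt]
    rw [pyfold_eq_bcScan]
    set b := PySem.List.sorted a0 (fun x => x) false with hbdef
    have hbpw : b.Pairwise (· ≤ ·) := PySem.List.sorted_pairwise a0 (fun x => x)
    have hcnt : ∀ v : Int, List.count v b = List.count v a0 :=
      fun v => (PySem.List.sorted_perm a0 (fun x => x) false).count_eq v
    obtain ⟨hHpw, hHmem⟩ := bcScan_spec b [] hbpw (by simp) (by simp)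
    obtain ⟨hPpw, hPmem⟩ := pairsOf_spec b hbpw
    have hHP : bcScan [] b = pairsOf b := by
      apply sorted_lt_eq _ _ hHpw hPpw
      intro v
      rw [hHmem v, hPmem v]
      simp
    rw [PySem.List.foldl_append_singleton_eq_map]
    simp only [List.nil_append]
    rw [bcGo_eq rest b [] hbpw (by simp), List.nil_append, hHP]
    apply List.map_congr_left
    intro i hi
    have hcount : 2 ≤ List.count i a0 := by
      have := (hPmem i).1 hi
      rw [hcnt i] at this
      exact this
    exact body_eq a0 rest i hcount
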